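-- pv_equiv track=rewrite | github.com/FGtatsuro/myatcoder | beginner_contest/116/C.py | dfs
-- ===== SOURCE A (Python) =====
-- def dfs(l):
--     if len(l) == 0:
--         return 0
--     if len(l) == 1:
--         return l[0]
--     else:
--         dec = min(l)
--         split = []
--         e = []
--         for v in l:
--             if v - dec == 0:
--                 split.append(e)
--                 e = []
--             else:
--                 e.append(v - dec)
--         if e:
--             split.append(e)
--         ans = dec
--         for s in split:
--             ans += dfs(s)
--         return ans
-- ===== SOURCE B (Python) =====
-- def dfs(l):
--     if not l:
--         return 0
--     return l[0] + sum(b - a for a, b in zip(l, l[1:]) if b > a)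
-- ===== Notes on version B (the rewrite author's own statement) =====
-- stated objective: faster
-- what changed: Replaced A's recursive subtract-the-minimum-and-split-into-runs divide-and-conquer with a single pass summing l[0] plus the positive consecutive differences.
import Mathlib
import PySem

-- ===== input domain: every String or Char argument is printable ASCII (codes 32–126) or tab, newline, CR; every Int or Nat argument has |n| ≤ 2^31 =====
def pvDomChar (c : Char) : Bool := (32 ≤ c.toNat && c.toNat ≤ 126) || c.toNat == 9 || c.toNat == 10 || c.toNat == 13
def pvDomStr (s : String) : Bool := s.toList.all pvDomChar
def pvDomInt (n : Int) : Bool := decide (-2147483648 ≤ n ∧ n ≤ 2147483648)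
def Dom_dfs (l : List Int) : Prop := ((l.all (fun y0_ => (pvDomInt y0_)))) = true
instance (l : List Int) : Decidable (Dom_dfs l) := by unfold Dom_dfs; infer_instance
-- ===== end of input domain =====

-- B replaces A's recursive min-subtract-and-split with a single left-to-right pass
-- summing the positive consecutive differences (objective: faster, O(n^2) -> O(n)).

-- ===== PORT A =====
-- loop body of 'for v in l' maintaining (split, e)
def dfsStep (dec : Int) (acc : List (List Int) × List Int) (v : Int) : List (List Int) × List Int :=
  if v - dec = 0 then (acc.1 ++ [acc.2], []) else (acc.1, acc.2 ++ [v - dec])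

-- 'if e: split.append(e)'
def dfsFinish (p : List (List Int) × List Int) : List (List Int) :=
  if p.2 ≠ [] then p.1 ++ [p.2] else p.1

-- termination helper: total length stored in the state after the loop
theorem dfs_sumlen (dec : Int) : ∀ (t : List Int) (sp : List (List Int)) (e : List Int),
    ((t.foldl (dfsStep dec) (sp, e)).1.flatten.length + (t.foldl (dfsStep dec) (sp, e)).2.length)
      = sp.flatten.length + e.length + t.countP (fun v => !decide (v - dec = 0)) := by
  intro t
  induction t with
  | nil => intro sp e; simp
  | cons w t ih =>
    intro sp e
    simp only [List.foldl_cons, List.countP_cons, dfsStep]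
    by_cases h : w - dec = 0
    · simp only [if_pos h, ih]; simp [h]
    · simp only [if_neg h, ih]; simp [h]; omega

theorem dfs_mem_flatten_len {s : List Int} : ∀ {L : List (List Int)}, s ∈ L → s.length ≤ L.flatten.length := by
  intro L hs
  induction L with
  | nil => simp at hs
  | cons a L ih =>
    rcases List.mem_cons.1 hs with h | h
    · subst h; simp only [List.flatten_cons, List.length_append]; omega
    · have := ih h; simp only [List.flatten_cons, List.length_append]; omega

-- every piece handed to the recursive calls is strictly shorter than l
theorem dfs_seg_len_lt (l : List Int) (dec : Int) (hdec : dec ∈ l) (s : List Int)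
    (hs : s ∈ dfsFinish (l.foldl (dfsStep dec) ([], []))) : s.length < l.length := by
  have hsum := dfs_sumlen dec l [] []
  have hcnt : l.countP (fun v => !decide (v - dec = 0)) < l.length := by
    have hle := List.countP_le_length (p := fun v => !decide (v - dec = 0)) (l := l)
    rcases eq_or_lt_of_le hle with heq | hlt
    · exfalso
      have := (List.countP_eq_length).1 heq dec hdec
      simp at this
    · exact hlt
  have hmem : s ∈ (l.foldl (dfsStep dec) ([], [])).1 ∨ s = (l.foldl (dfsStep dec) ([], [])).2 := by
    unfold dfsFinish at hs
    split at hs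
    · rcases List.mem_append.1 hs with h | h
      · exact Or.inl h
      · exact Or.inr (by simpa using h)
    · exact Or.inl hs
  have hsle : s.length ≤ (l.foldl (dfsStep dec) ([], [])).1.flatten.length
      + (l.foldl (dfsStep dec) ([], [])).2.length := by
    rcases hmem with h | h
    · have := dfs_mem_flatten_len h; omega
    · subst h; omega
  simp only [List.flatten_nil, List.length_nil] at hsum
  omega

def dfs (l : List Int) : Int :=
  if l.length = 0 then 0
  else if l.length = 1 then l.headI
  else
    (dfsFinish (l.foldl (dfsStep ((PySem.List.min? l (fun y => y)).getD 0)) ([], []))).attach.foldl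
      (fun a s => a + dfs s.1) ((PySem.List.min? l (fun y => y)).getD 0)
termination_by l.length
decreasing_by
  rename_i h0 _
  have hne : l ≠ [] := by
    intro h; subst h; simp at h0
  obtain ⟨m, hm⟩ : ∃ m, PySem.List.min? l (fun y => y) = some m := by
    cases hmin : PySem.List.min? l (fun y => y) with
    | none => exact absurd ((PySem.List.min?_eq_none_iff _ _).1 hmin) hne
    | some m => exact ⟨m, rfl⟩
  have hmem := PySem.List.min?_mem hm
  have := dfs_seg_len_lt l ((PySem.List.min? l (fun y => y)).getD 0)
    (by rw [hm]; simpa using hmem) s.1 s.2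
  simpa using this

-- ===== PORT B =====
-- l[1:] ported as l.tail (exact for a nonnegative start index);
-- sum(b - a for a, b in zip(l, l[1:]) if b > a) ported as the fold over the zip
def dfs_alt (l : List Int) : Int :=
  if l = [] then 0
  else l.headI + (l.zip l.tail).foldl (fun acc ab => if ab.2 > ab.1 then acc + (ab.2 - ab.1) else acc) 0

-- ===== PRECONDITION & SPEC =====
def Spec_dfs (l : List Int) (out : Int) : Prop := out = dfs_alt l
instance (l : List Int) (out : Int) : Decidable (Spec_dfs l out) := by unfold Spec_dfs; infer_instance

-- ===== CLAIM (what is proved, stated in full; the proofs are below) =====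
def Claim_equal_dfs : Prop := ∀ (l : List Int), Dom_dfs l → Spec_dfs l (dfs l)

-- ===== LEMMAS AND PROOFS =====

theorem dfs_unfold (l : List Int) (h0 : ¬ l.length = 0) (h1 : ¬ l.length = 1) :
    dfs l = (dfsFinish (l.foldl (dfsStep ((PySem.List.min? l (fun y => y)).getD 0)) ([], []))).foldl
      (fun a s => a + dfs s) ((PySem.List.min? l (fun y => y)).getD 0) := by
  rw [dfs]
  simp only [if_neg h0, if_neg h1]
  exact List.foldl_attach (f := fun a s => a + dfs s)

-- chained sum of positive consecutive differences, starting from previous value p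
def chainC : Int → List Int → Int
  | _, [] => 0
  | p, w :: t => (if p < w then w - p else 0) + chainC w t

theorem zip_fold_eq_chainC : ∀ (t : List Int) (p acc : Int),
    ((p :: t).zip t).foldl (fun acc ab => if ab.2 > ab.1 then acc + (ab.2 - ab.1) else acc) acc
      = acc + chainC p t := by
  intro t
  induction t with
  | nil => intro p acc; simp [chainC]
  | cons w t ih =>
    intro p acc
    simp only [List.zip_cons_cons, List.foldl_cons, chainC, ih]
    by_cases h : p < w
    · simp [h]; omega
    · simp [h]

theorem dfs_alt_cons (h : Int) (t : List Int) : dfs_alt (h :: t) = h + chainC h t := by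
  simp [dfs_alt, zip_fold_eq_chainC]

theorem chainC_append_singleton : ∀ (t : List Int) (p x : Int),
    chainC p (t ++ [x]) = chainC p t
      + (if t.getLastD p < x then x - t.getLastD p else 0) := by
  intro t
  induction t with
  | nil => intro p x; simp [chainC]
  | cons w t ih =>
    intro p x
    simp only [List.cons_append, chainC, ih, List.getLastD_cons]
    omega

-- the fold only appends at the left component: factor out the initial split list
theorem dfs_fold_factor (dec : Int) : ∀ (t : List Int) (sp : List (List Int)) (e : List Int),
    t.foldl (dfsStep dec) (sp, e)
      = (sp ++ (t.foldl (dfsStep dec) ([], e)).1, (t.foldl (dfsStep dec) ([], e)).2) := by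
  intro t
  induction t with
  | nil => intro sp e; simp
  | cons w t ih =>
    intro sp e
    simp only [List.foldl_cons, dfsStep]
    by_cases h : w - dec = 0
    · simp only [if_pos h]
      rw [ih (sp ++ [e]) [], ih ([] ++ [e]) []]
      simp
    · simp only [if_neg h]
      exact ih sp (e ++ [w - dec])

-- B-value of the produced runs: the invariant of A's splitting loop
theorem dfs_runs_sum (dec : Int) : ∀ (t : List Int) (prev : Int) (e : List Int),
    (∀ v ∈ t, dec ≤ v) → dec ≤ prev →
    ((e = [] ∧ prev = dec) ∨ (e ≠ [] ∧ e.getLast? = some (prev - dec))) →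
    ((dfsFinish (t.foldl (dfsStep dec) ([], e))).map dfs_alt).sum = dfs_alt e + chainC prev t := by
  intro t
  induction t with
  | nil =>
    intro prev e _ _ hinv
    rcases hinv with ⟨he, _⟩ | ⟨he, _⟩
    · subst he; simp [dfsFinish, chainC, dfs_alt]
    · simp [dfsFinish, he, chainC]
  | cons w t ih =>
    intro prev e hall hprev hinv
    have hw : dec ≤ w := hall w (by simp)
    simp only [List.foldl_cons, dfsStep]
    by_cases h : w - dec = 0
    · -- w = dec: close the current run e
      simp only [if_pos h]
      simp only [List.nil_append]
      rw [dfs_fold_factor dec t [e] []]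
      have hrec := ih dec [] (fun v hv => hall v (by simp [hv])) le_rfl (Or.inl ⟨rfl, rfl⟩)
      have hfin : dfsFinish ([e] ++ (t.foldl (dfsStep dec) ([], [])).1,
          (t.foldl (dfsStep dec) ([], [])).2)
          = [e] ++ dfsFinish (t.foldl (dfsStep dec) ([], [])) := by
        unfold dfsFinish
        split <;> simp
      rw [hfin]
      simp only [List.map_append, List.sum_append, hrec]
      have hwdec : w = dec := by omega
      have : chainC prev (w :: t) = chainC dec t := by
        simp [chainC, hwdec, not_lt.2 hprev]
      rw [this]
      simp [dfs_alt]
    · -- w > dec: extend the current run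
      simp only [if_neg h]
      have hwgt : dec < w := lt_of_le_of_ne hw (by omega)
      have hrec := ih w (e ++ [w - dec]) (fun v hv => hall v (by simp [hv])) (le_of_lt hwgt)
        (Or.inr ⟨by simp, by simp⟩)
      rw [hrec]
      have hstep : dfs_alt (e ++ [w - dec]) = dfs_alt e + (if prev < w then w - prev else 0) := by
        rcases hinv with ⟨he, hp⟩ | ⟨he, hp⟩
        · subst he; subst hp
          simp [dfs_alt, hwgt]
        · obtain ⟨h0, t0, rfl⟩ : ∃ h0 t0, e = h0 :: t0 := by
            cases e with
            | nil => exact absurd rfl he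
            | cons h0 t0 => exact ⟨h0, t0, rfl⟩
          have hlast : t0.getLastD h0 = prev - dec := by
            have h2 : (h0 :: t0).getLastD 0 = prev - dec := by
              rw [List.getLastD_eq_getLast?, hp]; rfl
            rw [List.getLastD_cons] at h2
            exact h2
          rw [List.cons_append, dfs_alt_cons, dfs_alt_cons, chainC_append_singleton, hlast]
          omega
      rw [hstep]
      simp [chainC]
      omega

theorem dfs_eq_alt : ∀ (n : Nat) (l : List Int), l.length ≤ n → dfs l = dfs_alt l := by
  intro n
  induction n with
  | zero =>
    intro l hl
    have : l = [] := List.length_eq_zero_iff.1 (Nat.le_zero.1 hl)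
    subst this; simp [dfs, dfs_alt]
  | succ n ih =>
    intro l hl
    by_cases h0 : l.length = 0
    · have : l = [] := List.length_eq_zero_iff.1 h0
      subst this; rw [dfs]; simp [dfs_alt]
    · by_cases h1 : l.length = 1
      · obtain ⟨x, rfl⟩ : ∃ x, l = [x] := List.length_eq_one_iff.1 h1
        rw [dfs]; simp [dfs_alt_cons, chainC]
      · obtain ⟨h, t, rfl⟩ : ∃ h t, l = h :: t := by
          cases l with
          | nil => simp at h0
          | cons h t => exact ⟨h, t, rfl⟩
        set L := h :: t with hL
        obtain ⟨m, hm⟩ : ∃ m, PySem.List.min? L (fun y => y) = some m := by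
          cases hmin : PySem.List.min? L (fun y => y) with
          | none => exact absurd ((PySem.List.min?_eq_none_iff _ _).1 hmin) (by simp [hL])
          | some m => exact ⟨m, rfl⟩
        have hmmem : m ∈ L := PySem.List.min?_mem hm
        have hmin : ∀ v ∈ L, m ≤ v := PySem.List.min?_isMin hm
        rw [dfs_unfold L h0 h1, hm]
        simp only [Option.getD_some]
        have hcong : (dfsFinish (L.foldl (dfsStep m) ([], []))).foldl (fun a s => a + dfs s) m
            = (dfsFinish (L.foldl (dfsStep m) ([], []))).foldl (fun a s => a + dfs_alt s) m := by
          apply PySem.List.foldl_congr_mem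
          intro acc s hs
          have hlt := dfs_seg_len_lt L m hmmem s hs
          have heq : dfs s = dfs_alt s := ih s (by omega)
          rw [heq]
        rw [hcong, PySem.List.foldl_add (g := fun s => dfs_alt s),
          dfs_runs_sum m L m [] hmin le_rfl (Or.inl ⟨rfl, rfl⟩)]
        have hhm : m ≤ h := hmin h (by simp [hL])
        simp only [hL, dfs_alt_cons, chainC]
        simp [dfs_alt]
        by_cases hc : m < h
        · simp [hc]; omega
        · simp [hc]; omega

-- ===== VERDICT (by name: the statement is the Claim_ definition above) =====
theorem dfs_spec : Claim_equal_dfs := by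
  intro l _
  unfold Spec_dfs
  exact dfs_eq_alt l.length l le_rfl
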